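-- pv_equiv track=rewrite | github.com/LaplaceFox/project-euler | pe125.py | hasSquareSum
-- ===== SOURCE A (Python) =====
-- def hasSquareSum(t):
-- 	lo = 1
-- 	hi = 2
-- 	tot = 5 #1^2  + 2^2
--
-- 	while lo != hi:
-- 		if tot == t:
-- 			return True
-- 		elif tot < t:
-- 			hi += 1
-- 			tot += hi**2
-- 		else:
-- 			tot -= lo**2
-- 			lo += 1
-- 	return False
-- ===== SOURCE B (Python) =====
-- def hasSquareSum(t):
--     a = 1
--     while a * a + (a + 1) * (a + 1) <= t:
--         s = 0
--         b = a
--         while s < t: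
--             s += b * b
--             b += 1
--         if s == t and b - a >= 2:
--             return True
--         a += 1
--     return False
-- ===== Notes on version B (the rewrite author's own statement) =====
-- stated objective: alternative
-- what changed: Replaced A's single sliding-window loop over (lo,hi,tot) by a nested loop: for each start a, accumulate consecutive squares until the running sum reaches t, checking for an exact hit of at least two terms.
import Mathlib
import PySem

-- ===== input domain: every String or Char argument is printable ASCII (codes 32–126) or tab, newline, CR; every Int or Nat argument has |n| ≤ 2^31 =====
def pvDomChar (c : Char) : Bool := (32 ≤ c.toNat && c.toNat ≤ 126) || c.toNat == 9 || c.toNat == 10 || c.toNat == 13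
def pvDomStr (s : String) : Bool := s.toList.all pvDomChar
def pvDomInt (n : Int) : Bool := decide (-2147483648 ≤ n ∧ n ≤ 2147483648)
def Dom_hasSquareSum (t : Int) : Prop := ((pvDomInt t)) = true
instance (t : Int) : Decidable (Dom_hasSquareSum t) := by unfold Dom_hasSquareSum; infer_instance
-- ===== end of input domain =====

-- B replaces A's sliding window by a nested start/accumulate loop (alternative decomposition, same results).

-- ===== PORT A =====
-- A's while loop over state (lo, hi, tot); the fuel argument only makes the
-- loop total (it is proved sufficient below), each step is A's step verbatim.
def loopA (t : Int) : Nat → Int → Int → Int → Bool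
  | 0, _, _, _ => false
  | n + 1, lo, hi, tot =>
    if lo ≠ hi then
      if tot = t then true
      else if tot < t then loopA t n lo (hi + 1) (tot + (hi + 1) ^ 2)
      else loopA t n (lo + 1) hi (tot - lo ^ 2)
    else false

def hasSquareSum (t : Int) : Bool :=
  loopA t (2 * (max 2 t).toNat + 1) 1 2 5

-- ===== PORT B =====
-- inner 'while s < t: s += b*b; b += 1' of Source B (fuel = totality guard only)
def loopBInner (t : Int) : Nat → Int → Int → Int × Int
  | 0, s, b => (s, b)
  | n + 1, s, b => if s < t then loopBInner t n (s + b * b) (b + 1) else (s, b)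

-- outer 'while a*a + (a+1)*(a+1) <= t' of Source B
def loopBOuter (t : Int) : Nat → Int → Bool
  | 0, _ => false
  | n + 1, a =>
    if a * a + (a + 1) * (a + 1) ≤ t then
      let sb := loopBInner t (t.toNat + 1) 0 a
      if sb.1 = t ∧ sb.2 - a ≥ 2 then true
      else loopBOuter t n (a + 1)
    else false

def hasSquareSum_alt (t : Int) : Bool :=
  loopBOuter t (t.toNat + 1) 1

-- ===== PRECONDITION & SPEC =====
def Spec_hasSquareSum (t : Int) (out : Bool) : Prop := out = hasSquareSum_alt t
instance (t : Int) (out : Bool) : Decidable (Spec_hasSquareSum t out) := by unfold Spec_hasSquareSum; infer_instance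

-- ===== CLAIM (what is proved, stated in full; the proofs are below) =====
def Claim_equal_hasSquareSum : Prop := ∀ (t : Int), Dom_hasSquareSum t → Spec_hasSquareSum t (hasSquareSum t)

-- ===== LEMMAS AND PROOFS =====

-- sum of squares over [a, b)  (exclusive upper end)
noncomputable def T (a b : Int) : Int := ∑ i ∈ Finset.Ico a b, i ^ 2

-- "t is a sum of at least two consecutive squares starting at a positive base"
def IsSqSum (t : Int) : Prop := ∃ a b : Int, 1 ≤ a ∧ a + 2 ≤ b ∧ T a b = t

theorem T_self (a : Int) : T a a = 0 := by simp [T]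

theorem T_succ_top (a b : Int) (h : a ≤ b) : T a (b + 1) = T a b + b ^ 2 := by
  unfold T
  rw [show Finset.Ico a (b + 1) = insert b (Finset.Ico a b) by
    ext x; simp [Finset.mem_Ico]; omega]
  rw [Finset.sum_insert (by simp)]
  ring

theorem T_bot (a b : Int) (h : a < b) : T a b = a ^ 2 + T (a + 1) b := by
  unfold T
  rw [show Finset.Ico a b = insert a (Finset.Ico (a + 1) b) by
    ext x; simp [Finset.mem_Ico]; omega]
  rw [Finset.sum_insert (by simp)]

theorem T_mono (a b c : Int) (h : b ≤ c) : T a b ≤ T a c := by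
  unfold T
  exact Finset.sum_le_sum_of_subset_of_nonneg
    (Finset.Ico_subset_Ico le_rfl h) (fun i _ _ => sq_nonneg i)

theorem T_two (a : Int) : T a (a + 2) = a ^ 2 + (a + 1) ^ 2 := by
  rw [show a + 2 = (a + 1) + 1 by ring, T_succ_top a (a + 1) (by omega),
      T_succ_top a a le_rfl, T_self]
  ring

theorem T_lower (a b : Int) (h : a + 2 ≤ b) : a ^ 2 + (a + 1) ^ 2 ≤ T a b := by
  calc a ^ 2 + (a + 1) ^ 2 = T a (a + 2) := (T_two a).symm
    _ ≤ T a b := T_mono a (a + 2) b h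

theorem T_mem_lower (a b : Int) (ha : a ≤ b) : b ^ 2 ≤ T a (b + 1) := by
  calc b ^ 2 = T b (b + 1) := by
        rw [T_succ_top b b le_rfl, T_self]; ring
    _ ≤ T a (b + 1) := by
        unfold T
        exact Finset.sum_le_sum_of_subset_of_nonneg
          (Finset.Ico_subset_Ico ha le_rfl) (fun i _ _ => sq_nonneg i)

-- no solution exists once every start below a is ruled out and a's own minimal
-- two-term sum already exceeds t
theorem noSolAbove (t a : Int) (ha : 1 ≤ a)
    (hex : ∀ a' b, 1 ≤ a' → a' < a → a' + 2 ≤ b → T a' b ≠ t)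
    (hgt : t < a ^ 2 + (a + 1) ^ 2) : ¬ IsSqSum t := by
  rintro ⟨a', b, h1, h2, h3⟩
  rcases lt_or_ge a' a with hlt | hge
  · exact hex a' b h1 hlt h2 h3
  · have hl : a' ^ 2 + (a' + 1) ^ 2 ≤ T a' b := T_lower a' b h2
    have : a ^ 2 + (a + 1) ^ 2 ≤ a' ^ 2 + (a' + 1) ^ 2 := by nlinarith
    omega

-- ===== sliding-window (A) correctness =====

def InvA (t lo hi tot : Int) : Prop :=
  1 ≤ lo ∧ lo ≤ hi ∧ hi ≤ max 2 t ∧ tot = T lo (hi + 1) ∧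
  (lo < hi ∨ t < lo ^ 2 + (lo + 1) ^ 2) ∧
  (∀ a b, 1 ≤ a → a < lo → a + 2 ≤ b → T a b ≠ t) ∧
  (∀ c, lo + 2 ≤ c → c ≤ hi → T lo c < t)

theorem loopA_correct (t : Int) : ∀ (n : Nat) (lo hi tot : Int),
    InvA t lo hi tot → 2 * max 2 t + 1 ≤ (n : Int) + lo + hi →
    (loopA t n lo hi tot = true ↔ IsSqSum t) := by
  intro n
  induction n with
  | zero =>
    intro lo hi tot hI hf
    obtain ⟨h1, h2, h3, _⟩ := hI
    exfalso
    have : lo ≤ max 2 t := le_trans h2 h3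
    simp at hf; omega
  | succ n ih =>
    intro lo hi tot hI hf
    obtain ⟨h1, h2, h3, h4, h5, h6, h7⟩ := hI
    rw [loopA]
    by_cases hne : lo = hi
    · -- exit: lo = hi, return False; no solution anywhere
      rw [if_neg (by simpa using hne)]
      simp only [Bool.false_eq_true, false_iff]
      rcases h5 with h5 | h5
      · omega
      · exact noSolAbove t lo h1 h6 h5
    · rw [if_pos hne]
      by_cases heq : tot = t
      · -- found: window [lo, hi] is a solution
        rw [if_pos heq]
        simp only [true_iff]
        exact ⟨lo, hi + 1, h1, by omega, by rw [← h4, heq]⟩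
      · rw [if_neg heq]
        have hlohi : lo < hi := lt_of_le_of_ne h2 hne
        by_cases hlt : tot < t
        · -- expand hi
          rw [if_pos hlt]
          apply ih
          · refine ⟨h1, by omega, ?_, ?_, Or.inl (by omega), h6, ?_⟩
            · -- hi + 1 ≤ max 2 t : from hi^2 ≤ tot < t and hi ≥ 2
              have hsq : hi ^ 2 ≤ tot := by
                rw [h4]; exact T_mem_lower lo hi h2
              have hhi2 : 2 ≤ hi := by omega
              have : hi + hi ≤ hi ^ 2 := by nlinarith
              have : hi + 1 ≤ t := by omega
              omega
            · rw [h4, T_succ_top lo (hi + 1) (by omega)]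
            · intro c hc1 hc2
              rcases eq_or_lt_of_le hc2 with hc | hc
              · rw [hc, ← h4]; omega
              · exact h7 c hc1 (by omega)
          · push_cast; push_cast at hf; omega
        · -- shrink lo
          rw [if_neg hlt]
          have hgt : t < tot := by omega
          apply ih
          · refine ⟨by omega, by omega, h3, ?_, ?_, ?_, ?_⟩
            · rw [h4, T_bot lo (hi + 1) (by omega)]; ring
            · -- lo+1 < hi ∨ t < (lo+1)^2 + (lo+2)^2
              rcases lt_or_ge (lo + 1) hi with h | h
              · exact Or.inl h
              · right
                have hhe : hi = lo + 1 := by omega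
                have : tot = lo ^ 2 + (lo + 1) ^ 2 := by
                  rw [h4, hhe, show lo + 1 + 1 = lo + 2 by ring, T_two]
                nlinarith
            · intro a b ha hab hb
              rcases lt_or_ge a lo with h | h
              · exact h6 a b ha h hb
              · have haeq : a = lo := by omega
                subst haeq
                rcases le_or_gt b hi with h' | h'
                · exact ne_of_lt (h7 b hb h')
                · have : tot ≤ T a b := by rw [h4]; exact T_mono a (hi + 1) b (by omega)
                  omega
            · intro c hc1 hc2
              have : T (lo + 1) c = T lo c - lo ^ 2 := by
                rw [T_bot lo c (by omega)]; ring
              have hTc : T lo c < t := h7 c (by omega) hc2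
              have hlo2 : 1 ≤ lo ^ 2 := by nlinarith
              omega
          · push_cast; push_cast at hf; omega

theorem hasSquareSum_iff (t : Int) : hasSquareSum t = true ↔ IsSqSum t := by
  unfold hasSquareSum
  apply loopA_correct
  · refine ⟨le_rfl, by omega, le_max_left 2 t, ?_, Or.inl (by omega), ?_, ?_⟩
    · rw [show (2 : Int) + 1 = (1 : Int) + 1 + 1 by ring,
          T_succ_top 1 (1 + 1) (by omega), T_succ_top 1 1 le_rfl, T_self]
      norm_num
    · intro a b ha hab _; omega
    · intro c hc1 hc2; omega
  · have h1 : (((max 2 t).toNat : Int)) = max 2 t := by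
      have : (0 : Int) ≤ max 2 t := le_trans (by omega) (le_max_left 2 t)
      omega
    push_cast; omega

-- ===== nested-loop (B) correctness =====

theorem loopBInner_correct (t a : Int) (ha : 1 ≤ a) :
    ∀ (n : Nat) (s b : Int), a ≤ b → s = T a b → t - s ≤ (n : Int) →
    (loopBInner t n s b).1 = T a (loopBInner t n s b).2 ∧
    b ≤ (loopBInner t n s b).2 ∧
    ¬ ((loopBInner t n s b).1 < t) ∧
    (∀ c, b ≤ c → c < (loopBInner t n s b).2 → T a c < t) := by
  intro n
  induction n with
  | zero =>
    intro s b hb hs hf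
    simp at hf
    rw [loopBInner]
    exact ⟨hs, le_rfl, by omega, fun c h1 h2 => absurd h2 (by omega)⟩
  | succ n ih =>
    intro s b hb hs hf
    rw [loopBInner]
    by_cases hlt : s < t
    · rw [if_pos hlt]
      have hb2 : 1 ≤ b * b := by nlinarith
      have hrec := ih (s + b * b) (b + 1) (by omega)
        (by rw [T_succ_top a b hb, hs]; ring) (by push_cast; push_cast at hf; omega)
      refine ⟨hrec.1, by omega, hrec.2.2.1, ?_⟩
      intro c h1 h2
      rcases eq_or_lt_of_le h1 with h | h
      · rw [← h, ← hs]; omega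
      · exact hrec.2.2.2 c (by omega) h2
    · rw [if_neg hlt]
      exact ⟨hs, le_rfl, hlt, fun c h1 h2 => absurd h2 (by omega)⟩

theorem loopBOuter_correct (t : Int) : ∀ (n : Nat) (a : Int),
    1 ≤ a → (∀ a' b, 1 ≤ a' → a' < a → a' + 2 ≤ b → T a' b ≠ t) →
    t - a ≤ (n : Int) →
    (loopBOuter t n a = true ↔ IsSqSum t) := by
  intro n
  induction n with
  | zero =>
    intro a ha hex hf
    simp at hf
    rw [loopBOuter]
    simp only [Bool.false_eq_true, false_iff]
    apply noSolAbove t a ha hex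
    nlinarith
  | succ n ih =>
    intro a ha hex hf
    rw [loopBOuter]
    by_cases hc : a * a + (a + 1) * (a + 1) ≤ t
    · rw [if_pos hc]
      have hfin : (t.toNat : Int) + 1 ≥ t - 0 := by omega
      have hinner := loopBInner_correct t a ha (t.toNat + 1) 0 a le_rfl
        (T_self a).symm (by push_cast; omega)
      set sb := loopBInner t (t.toNat + 1) 0 a with hsb
      obtain ⟨hi1, hi2, hi3, hi4⟩ := hinner
      by_cases hhit : sb.1 = t ∧ sb.2 - a ≥ 2
      · rw [if_pos hhit]
        simp only [true_iff]
        exact ⟨a, sb.2, ha, by omega, by rw [← hi1]; exact hhit.1⟩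
      · rw [if_neg hhit]
        apply ih (a + 1) (by omega)
        · intro a' b ha' hlt hb
          rcases lt_or_ge a' a with h | h
          · exact hex a' b ha' h hb
          · have haeq : a' = a := by omega
            subst haeq
            -- suppose T a' b = t with b ≥ a' + 2; contradict the inner-loop facts
            intro habs
            rcases lt_trichotomy b sb.2 with h' | h' | h'
            · exact absurd habs (ne_of_lt (hi4 b (by omega) h'))
            · exact hhit ⟨by rw [hi1, ← h']; exact habs, by omega⟩
            · have h1 : T a' (sb.2 + 1) ≤ T a' b := T_mono a' (sb.2 + 1) b (by omega)
              have h2 : T a' (sb.2 + 1) = T a' sb.2 + sb.2 ^ 2 :=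
                T_succ_top a' sb.2 hi2
              have h3 : 1 ≤ sb.2 ^ 2 := by nlinarith
              rw [← hi1] at h2
              omega
        · push_cast; push_cast at hf; omega
    · rw [if_neg hc]
      simp only [Bool.false_eq_true, false_iff]
      apply noSolAbove t a ha hex
      nlinarith

theorem hasSquareSum_alt_iff (t : Int) : hasSquareSum_alt t = true ↔ IsSqSum t := by
  unfold hasSquareSum_alt
  apply loopBOuter_correct
  · exact le_rfl
  · intro a b ha hab _; omega
  · push_cast; omega

-- ===== VERDICT (by name: the statement is the Claim_ definition above) =====
theorem hasSquareSum_spec : Claim_equal_hasSquareSum := by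
  intro t _
  unfold Spec_hasSquareSum
  have hA := hasSquareSum_iff t
  have hB := hasSquareSum_alt_iff t
  cases hA' : hasSquareSum t with
  | true => exact ((hB.mpr (hA.mp hA')).symm)
  | false =>
    cases hB' : hasSquareSum_alt t with
    | true => exact absurd (hA.mpr (hB.mp hB')) (by simp [hA'])
    | false => rfl
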